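-- pv_equiv track=rewrite | github.com/Kbediako/prime-intellect-rl-tower-defense | src/prime_td_env/actual_game_env.py | _normalize_allowed_commands
-- ===== SOURCE A (Python) =====
-- from typing import Any, Dict, Iterable, List, Tuple
--
-- COMMAND_TYPES = (
--     "place_tower",
--     "upgrade_tower",
--     "sell_tower",
--     "trigger_next_round",
-- )
--
-- def _normalize_non_empty_string(value: Any, field: str) -> str:
--     if not isinstance(value, str) or not value.strip():
--         raise ValueError(f"{field} must be a non-empty string")
--     return value.strip()
--
-- def _normalize_allowed_commands(value: Any) -> List[str]:
--     if not isinstance(value, list) or not value: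
--         raise ValueError("allowedCommands must be a non-empty list")
--     normalized: List[str] = []
--     seen = set()
--     for entry in value:
--         command = _normalize_non_empty_string(entry, "allowedCommands[]").lower()
--         if command not in COMMAND_TYPES:
--             raise ValueError(f"Unsupported allowed command: {command}")
--         if command not in seen:
--             normalized.append(command)
--             seen.add(command)
--     return normalized
-- ===== SOURCE B (Python) =====
-- from typing import Any, List
--
-- COMMAND_TYPES = (
--     "place_tower",
--     "upgrade_tower",
--     "sell_tower",
--     "trigger_next_round",
-- )
--
-- def _validated_command(entry: Any) -> str:
--     if not isinstance(entry, str) or not entry.strip():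
--         raise ValueError("allowedCommands[] must be a non-empty string")
--     command = entry.strip().lower()
--     if command not in COMMAND_TYPES:
--         raise ValueError(f"Unsupported allowed command: {command}")
--     return command
--
-- def _normalize_allowed_commands(value: Any) -> List[str]:
--     if not isinstance(value, list) or not value:
--         raise ValueError("allowedCommands must be a non-empty list")
--     # validate everything first (raising in the same order A does)
--     commands = [_validated_command(entry) for entry in value]
--     # the result is exactly the command types that occur, ordered by where
--     # each first occurs: rank the fixed 4-command universe by first index
--     present = [c for c in COMMAND_TYPES if c in commands]
--     return sorted(present, key=commands.index)
-- ===== Notes on version B (the rewrite author's own statement) =====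
-- stated objective: alternative
-- what changed: B first validates every entry into a flat list, then rebuilds the answer without any streaming dedup: it takes the fixed 4-command universe, keeps the commands that occur, and sorts them by their first-occurrence index -- a rank-and-sort over the finite alphabet instead of A's interleaved seen-set loop with conditional append.
import Mathlib
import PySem

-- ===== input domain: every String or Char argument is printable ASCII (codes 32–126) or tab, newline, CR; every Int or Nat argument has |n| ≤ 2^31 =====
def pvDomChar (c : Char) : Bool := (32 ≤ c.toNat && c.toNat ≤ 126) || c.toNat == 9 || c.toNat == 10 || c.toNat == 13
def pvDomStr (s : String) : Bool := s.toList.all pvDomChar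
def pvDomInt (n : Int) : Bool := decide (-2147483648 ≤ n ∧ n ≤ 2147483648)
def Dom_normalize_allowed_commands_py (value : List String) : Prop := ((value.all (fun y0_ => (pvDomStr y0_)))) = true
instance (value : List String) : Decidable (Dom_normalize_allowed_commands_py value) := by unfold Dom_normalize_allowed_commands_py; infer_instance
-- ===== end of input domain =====

-- ===== PORT A =====
-- B validates all entries into a list, then sorts the present command types by first
-- occurrence index; objective: alternative decomposition, same cost.
def pvCommandTypes : List String :=
  ["place_tower", "upgrade_tower", "sell_tower", "trigger_next_round"]

-- _normalize_non_empty_string: none = the ValueError on a blank/whitespace-only string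
def pvNormalizeNonEmptyString? (s : String) : Option String :=
  if PySem.Str.strip s = "" then none else some (PySem.Str.strip s)

-- the for-loop over value carrying (normalized, seen); none = a raise inside the loop
def pvNormLoop : List String → List String → PySem.Set String → Option (List String)
  | [], normalized, _ => some normalized
  | entry :: rest, normalized, seen =>
    match pvNormalizeNonEmptyString? entry with
    | none => none
    | some stripped =>
      let command := PySem.Str.lower stripped
      if command ∈ pvCommandTypes then
        if command ∈ seen then
          pvNormLoop rest normalized seen
        else
          pvNormLoop rest (normalized ++ [command]) (PySem.Set.add seen command)
      else none

def normalize_allowed_commands_py (value : List String) : List String :=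
  -- Python raises ValueError on the empty list and on invalid entries; Pre_ excludes those
  if value = [] then []
  else (pvNormLoop value [] PySem.Set.empty).getD []

-- ===== PORT B =====
-- _validated_command: none = either ValueError
def pvValidated? (entry : String) : Option String :=
  if PySem.Str.strip entry = "" then none
  else
    let command := PySem.Str.lower (PySem.Str.strip entry)
    if command ∈ pvCommandTypes then some command else none

def normalize_allowed_commands_py_alt (value : List String) : List String :=
  if value = [] then []
  else
    match value.mapM pvValidated? with
    | none => []
    | some commands =>
      let present := pvCommandTypes.filter (fun c => decide (c ∈ commands))
      -- commands.index c: exact here since every c ∈ present occurs in commands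
      PySem.List.sorted present (fun c => ((PySem.List.index? commands c).getD 0 : Nat)) false

-- ===== PRECONDITION & SPEC =====
-- Pre_: exactly the inputs on which A returns (no ValueError): a non-empty list whose every
-- entry strips+lowers to a supported command (a blank entry lowers to "", never supported).
def Pre_normalize_allowed_commands_py (value : List String) : Prop :=
  value ≠ [] ∧ ∀ s ∈ value, PySem.Str.lower (PySem.Str.strip s) ∈
    (["place_tower", "upgrade_tower", "sell_tower", "trigger_next_round"] : List String)
instance (value : List String) : Decidable (Pre_normalize_allowed_commands_py value) := by
  unfold Pre_normalize_allowed_commands_py; infer_instance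

def pvWitness_normalize_allowed_commands_py : List String :=
  [" Place_Tower ", "sell_tower", "place_tower"]

def Spec_normalize_allowed_commands_py (value : List String) (out : List String) : Prop :=
  out = normalize_allowed_commands_py_alt value
instance (value : List String) (out : List String) :
    Decidable (Spec_normalize_allowed_commands_py value out) := by
  unfold Spec_normalize_allowed_commands_py; infer_instance

-- ===== CLAIM (what is proved, stated in full; the proofs are below) =====
def Claim_equal_normalize_allowed_commands_py : Prop :=
  ∀ (value : List String), Dom_normalize_allowed_commands_py value →
    Pre_normalize_allowed_commands_py value →
    Spec_normalize_allowed_commands_py value (normalize_allowed_commands_py value)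

-- ===== LEMMAS AND PROOFS =====

def pvCmd (e : String) : String := PySem.Str.lower (PySem.Str.strip e)

def pvKIdx (cs : List String) (c : String) : Nat := (PySem.List.index? cs c).getD 0

lemma pvCmd_valid_strip_ne {e : String}
    (h : pvCmd e ∈ pvCommandTypes) : PySem.Str.strip e ≠ "" := by
  intro hs
  rw [pvCmd, hs] at h
  exact absurd h (by decide)

lemma pvMapM_valid (value : List String)
    (h : ∀ e ∈ value, pvCmd e ∈ pvCommandTypes) :
    value.mapM pvValidated? = some (value.map pvCmd) := by
  induction value with
  | nil => rfl
  | cons e rest ih =>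
    have he := h e (List.mem_cons_self ..)
    have hrest := ih (fun x hx => h x (List.mem_cons_of_mem _ hx))
    simp only [List.mapM_cons, List.map_cons, pvValidated?,
      if_neg (pvCmd_valid_strip_ne he)]
    rw [show PySem.Str.lower (PySem.Str.strip e) = pvCmd e from rfl, if_pos he]
    simp [hrest]

lemma pvNormLoop_valid (entries : List String) (acc : List String)
    (h : ∀ e ∈ entries, pvCmd e ∈ pvCommandTypes) :
    pvNormLoop entries acc acc = some (List.foldl PySem.Set.add acc (entries.map pvCmd)) := by
  induction entries generalizing acc with
  | nil => rfl
  | cons e rest ih =>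
    have he := h e (List.mem_cons_self ..)
    have hrest := fun x hx => h x (List.mem_cons_of_mem _ hx)
    simp only [pvNormLoop, pvNormalizeNonEmptyString?, if_neg (pvCmd_valid_strip_ne he),
      List.map_cons, List.foldl_cons]
    rw [show PySem.Str.lower (PySem.Str.strip e) = pvCmd e from rfl, if_pos he]
    by_cases hmem : pvCmd e ∈ acc
    · rw [if_pos hmem, show PySem.Set.add acc (pvCmd e) = acc by
        simp [PySem.Set.add, hmem]]
      exact ih acc hrest
    · rw [if_neg hmem, show PySem.Set.add acc (pvCmd e) = acc ++ [pvCmd e] by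
        simp [PySem.Set.add, hmem]]
      exact ih (acc ++ [pvCmd e]) hrest

-- kIdx = the port-B sort key, Python's commands.index
lemma pvKIdx_cons_self (x : String) (xs : List String) : pvKIdx (x :: xs) x = 0 := by
  rw [pvKIdx, PySem.List.index?_cons_self]; rfl

lemma pvKIdx_cons_ne (x c : String) (xs : List String) (hne : x ≠ c) (hc : c ∈ xs) :
    pvKIdx (x :: xs) c = pvKIdx xs c + 1 := by
  obtain ⟨k, hk⟩ := Option.isSome_iff_exists.mp ((PySem.List.index?_isSome_iff xs c).mpr hc)
  rw [pvKIdx, pvKIdx, PySem.List.index?_cons_of_ne xs hne, hk]; rfl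

lemma pvKIdx_cons_pos (x c : String) (xs : List String) (hne : x ≠ c) (hc : c ∈ xs) :
    0 < pvKIdx (x :: xs) c := by rw [pvKIdx_cons_ne x c xs hne hc]; omega

-- filtering an element out preserves the relative order of first occurrences
lemma pvKIdx_filter_mono (x : String) : ∀ (xs : List String) (a b : String),
    a ∈ xs → b ∈ xs → a ≠ x → b ≠ x →
    pvKIdx (xs.filter (fun y => y != x)) a < pvKIdx (xs.filter (fun y => y != x)) b →
    pvKIdx xs a < pvKIdx xs b := by
  intro xs
  induction xs with
  | nil => intro a b ha; exact absurd ha (List.not_mem_nil)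
  | cons y ys ih =>
    intro a b ha hb hax hbx h
    by_cases hyx : y = x
    · subst hyx
      have ha' : a ∈ ys := by cases ha with | head => exact absurd rfl hax | tail _ h => exact h
      have hb' : b ∈ ys := by cases hb with | head => exact absurd rfl hbx | tail _ h => exact h
      rw [List.filter_cons_of_neg (by simp)] at h
      rw [pvKIdx_cons_ne y a ys (fun e => hax e.symm) ha',
        pvKIdx_cons_ne y b ys (fun e => hbx e.symm) hb']
      exact Nat.succ_lt_succ (ih a b ha' hb' hax hbx h)
    · rw [List.filter_cons_of_pos (by simp [hyx])] at h
      by_cases hya : y = a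
      · subst hya
        have hb' : b ∈ ys := by
          cases hb with
          | head => rw [pvKIdx_cons_self] at h; exact absurd h (by omega)
          | tail _ h2 => exact h2
        have hyb : y ≠ b := by
          intro e; subst e; rw [pvKIdx_cons_self] at h; exact absurd h (by omega)
        rw [pvKIdx_cons_self]
        exact pvKIdx_cons_pos y b ys hyb hb'
      · have ha' : a ∈ ys := by
          cases ha with | head => exact absurd rfl (fun e => hya e.symm) | tail _ h2 => exact h2
        by_cases hyb : y = b
        · subst hyb
          have haf : a ∈ ys.filter (fun y2 => y2 != x) := by simp [List.mem_filter, ha', hax]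
          rw [pvKIdx_cons_self, pvKIdx_cons_ne y a _ hya haf] at h
          exact absurd h (by omega)
        · have hb' : b ∈ ys := by
            cases hb with | head => exact absurd rfl (fun e => hyb e.symm) | tail _ h2 => exact h2
          have haf : a ∈ ys.filter (fun y2 => y2 != x) := by simp [List.mem_filter, ha', hax]
          have hbf : b ∈ ys.filter (fun y2 => y2 != x) := by simp [List.mem_filter, hb', hbx]
          rw [pvKIdx_cons_ne y a _ hya haf, pvKIdx_cons_ne y b _ hyb hbf] at h
          rw [pvKIdx_cons_ne y a ys hya ha', pvKIdx_cons_ne y b ys hyb hb']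
          exact Nat.succ_lt_succ (ih a b ha' hb' hax hbx (by omega))

-- the seen-set fold pulls a fresh head out front
lemma pvFoldlAdd_cons (x : String) : ∀ (xs acc : List String),
    List.foldl PySem.Set.add (x :: acc) xs
      = x :: List.foldl PySem.Set.add acc (xs.filter (fun y => y != x)) := by
  intro xs
  induction xs with
  | nil => intro acc; rfl
  | cons y ys ih =>
    intro acc
    by_cases hyx : y = x
    · subst hyx
      simp only [List.filter_cons, bne_self_eq_false, List.foldl_cons]
      rw [show PySem.Set.add (y :: acc) y = y :: acc by simp [PySem.Set.add]]
      exact ih acc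
    · have hb : (y != x) = true := by simp [hyx]
      simp only [List.filter_cons, hb, List.foldl_cons, if_true]
      rw [show PySem.Set.add (x :: acc) y = x :: PySem.Set.add acc y by
        by_cases hm : y ∈ acc
        · simp [PySem.Set.add, hm, hyx]
        · simp [PySem.Set.add, hm, hyx]]
      exact ih (PySem.Set.add acc y)

-- dedup keeps the head, then dedups the tail with the head removed
lemma pvDedup_cons (x : String) (xs : List String) :
    PySem.List.dedup (x :: xs) =
      x :: PySem.List.dedup (xs.filter (fun y => y != x)) := by
  show List.foldl PySem.Set.add PySem.Set.empty (x :: xs) = _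
  rw [List.foldl_cons,
    show PySem.Set.add PySem.Set.empty x = x :: ([] : List String) by rfl,
    pvFoldlAdd_cons x xs []]
  rfl

-- the elements of dedup cs are listed in strictly increasing first-occurrence order
lemma pvDedup_pairwise_bounded : ∀ (n : Nat) (cs : List String), cs.length ≤ n →
    (PySem.List.dedup cs).Pairwise (fun a b => pvKIdx cs a < pvKIdx cs b) := by
  intro n
  induction n with
  | zero =>
    intro cs hlen
    rw [List.length_eq_zero_iff.mp (Nat.le_zero.mp hlen)]
    exact List.Pairwise.nil
  | succ n ih =>
    intro cs hlen
    match cs with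
    | [] => exact List.Pairwise.nil
    | x :: xs =>
      rw [pvDedup_cons]
      refine List.Pairwise.cons ?_ ?_
      · intro b hbmem
        have hb := (PySem.List.mem_dedup _ _).mp hbmem
        have hbx : b ≠ x := by simpa using (List.mem_filter.mp hb).2
        have hbxs : b ∈ xs := (List.mem_filter.mp hb).1
        rw [pvKIdx_cons_self]
        exact pvKIdx_cons_pos x b xs (fun e => hbx e.symm) hbxs
      · have hlen' : (xs.filter (fun y => y != x)).length ≤ n :=
          le_trans (List.length_filter_le _ _) (by simpa using hlen)
        refine (ih _ hlen').imp_of_mem ?_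
        intro a b hma hmb hab
        have ha := List.mem_filter.mp ((PySem.List.mem_dedup _ _).mp hma)
        have hb := List.mem_filter.mp ((PySem.List.mem_dedup _ _).mp hmb)
        have hax : a ≠ x := by simpa using ha.2
        have hbx : b ≠ x := by simpa using hb.2
        have h2 := pvKIdx_filter_mono x xs a b ha.1 hb.1 hax hbx hab
        rw [pvKIdx_cons_ne x a xs (fun e => hax e.symm) ha.1,
          pvKIdx_cons_ne x b xs (fun e => hbx e.symm) hb.1]
        omega

lemma pvDedup_pairwise (cs : List String) :
    (PySem.List.dedup cs).Pairwise (fun a b => pvKIdx cs a < pvKIdx cs b) :=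
  pvDedup_pairwise_bounded cs.length cs le_rfl

-- dedup cs is a rearrangement of the present command types
lemma pvDedup_perm_filter (cs : List String)
    (h : ∀ c ∈ cs, c ∈ pvCommandTypes) :
    (PySem.List.dedup cs).Perm (pvCommandTypes.filter (fun c => decide (c ∈ cs))) := by
  refine (List.perm_ext_iff_of_nodup (PySem.List.nodup_dedup cs)
    ((by decide : pvCommandTypes.Nodup).filter _)).mpr ?_
  intro a
  rw [PySem.List.mem_dedup, List.mem_filter]
  constructor
  · intro ha; exact ⟨h a ha, by simpa using ha⟩
  · intro ⟨_, ha⟩; simpa using ha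

-- ===== VERDICT (by name: the statement is the Claim_ definition above) =====
theorem normalize_allowed_commands_py_spec : Claim_equal_normalize_allowed_commands_py := by
  intro value _hdom hpre
  obtain ⟨hne, hall⟩ := hpre
  have hall' : ∀ e ∈ value, pvCmd e ∈ pvCommandTypes := fun e he => hall e he
  have hcs : ∀ c ∈ value.map pvCmd, c ∈ pvCommandTypes := by
    intro c hc
    obtain ⟨e, he, rfl⟩ := List.mem_map.mp hc
    exact hall' e he
  unfold Spec_normalize_allowed_commands_py normalize_allowed_commands_py
    normalize_allowed_commands_py_alt
  rw [if_neg hne, if_neg hne, pvMapM_valid value hall',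
    show PySem.Set.empty = ([] : List String) from rfl,
    pvNormLoop_valid value [] hall']
  have hfoldl : List.foldl PySem.Set.add [] (value.map pvCmd)
      = PySem.List.dedup (value.map pvCmd) := by
    simp [PySem.List.dedup, PySem.Set.ofList, PySem.Set.empty]
  simp only [Option.getD_some, hfoldl]
  exact (PySem.List.sorted_eq_of_perm_of_pairwise_lt _ _ _
    (pvDedup_perm_filter _ hcs) (pvDedup_pairwise _)).symm
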